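-- pv_equiv track=rewrite | github.com/jarikmarwede/IdeaBag2-Solutions | Text/Scooby Doo/scooby_doo.py | scoobydoo
-- ===== SOURCE A (Python) =====
-- VOWELS = ("a", "e", "i", "o", "u")
--
-- CONSONANTS = ("b", "c", "d", "f", "g",
--               "h", "j", "k", "l", "m",
--               "n", "p", "q", "r", "s",
--               "t", "v", "w", "x", "z")
--
-- def scoobydoo(string: str) -> str:
--     """Return a scooby doo version of string."""
--     new_string = ""
--
--     for word in string.split():
--         skip = False
--
--         for char in word:
--             if skip is True:
--                 new_string += char
--             elif char.lower() in VOWELS: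
--                 new_string += char
--                 skip = True
--             elif char.lower() in CONSONANTS:
--                 new_string += "r"
--             else:
--                 new_string += char
--         new_string += " "
--
--     new_string = new_string.rstrip()
--     return new_string
-- ===== SOURCE B (Python) =====
-- VOWELS = ("a", "e", "i", "o", "u")
--
-- CONSONANTS = ("b", "c", "d", "f", "g",
--               "h", "j", "k", "l", "m",
--               "n", "p", "q", "r", "s",
--               "t", "v", "w", "x", "z")
--
--
-- def scoobydoo(string: str) -> str:
--     """Return a scooby doo version of string."""
--     def transform(word):
--         idx = next((i for i, c in enumerate(word) if c.lower() in VOWELS),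
--                    len(word))
--         return ("".join("r" if c.lower() in CONSONANTS else c
--                         for c in word[:idx]) + word[idx:])
--
--     return " ".join(transform(word) for word in string.split())
-- ===== Notes on version B (the rewrite author's own statement) =====
-- stated objective: alternative
-- what changed: Replaces the stateful per-character skip-flag scan that grows one big string by repeated concatenation and trims with rstrip by a find-the-first-vowel split point per word (map only the prefix, keep the suffix untouched) assembled with a single space-join at the end.
import Mathlib
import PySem

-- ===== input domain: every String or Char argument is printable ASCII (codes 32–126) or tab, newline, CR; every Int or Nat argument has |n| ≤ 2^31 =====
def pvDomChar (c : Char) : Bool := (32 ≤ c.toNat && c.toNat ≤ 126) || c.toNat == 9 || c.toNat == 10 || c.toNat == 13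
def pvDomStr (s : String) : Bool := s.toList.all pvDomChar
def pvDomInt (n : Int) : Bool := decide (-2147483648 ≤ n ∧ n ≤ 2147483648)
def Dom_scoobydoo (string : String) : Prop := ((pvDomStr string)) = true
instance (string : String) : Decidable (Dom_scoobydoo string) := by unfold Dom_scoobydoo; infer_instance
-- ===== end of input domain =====

-- B replaces A's stateful skip-flag scan with manual concatenation and rstrip by a
-- first-vowel split point (map the prefix, keep the suffix) assembled with a space-join
-- (objective: alternative decomposition, same asymptotic cost).

-- ===== PORT A =====
-- Python's VOWELS/CONSONANTS are tuples of one-character strings tested via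
-- `char.lower() in VOWELS`; ported exactly as membership of the lowered character.
def pvVowels : List Char := ['a', 'e', 'i', 'o', 'u']

def pvConsonants : List Char :=
  ['b', 'c', 'd', 'f', 'g', 'h', 'j', 'k', 'l', 'm',
   'n', 'p', 'q', 'r', 's', 't', 'v', 'w', 'x', 'z']

def scoobyStep (st : List Char × Bool) (c : Char) : List Char × Bool :=
  if st.2 = true then (st.1 ++ [c], st.2)
  else if pvVowels.contains (PySem.Chars.lowerChar c) then (st.1 ++ [c], true)
  else if pvConsonants.contains (PySem.Chars.lowerChar c) then (st.1 ++ ['r'], st.2)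
  else (st.1 ++ [c], st.2)

def scoobydoo (string : String) : String :=
  String.mk (PySem.Chars.rstrip
    ((PySem.Chars.split₀ string.toList).foldl
      (fun acc word => (word.foldl scoobyStep (acc, false)).1 ++ [' ']) []))

-- ===== PORT B =====
def transformAlt (w : List Char) : List Char :=
  let idx := (w.findIdx? (fun c => pvVowels.contains (PySem.Chars.lowerChar c))).getD w.length
  (w.take idx).map (fun c => if pvConsonants.contains (PySem.Chars.lowerChar c) then 'r' else c)
    ++ w.drop idx

def scoobydoo_alt (string : String) : String :=
  String.mk (PySem.Chars.join [' '] ((PySem.Chars.split₀ string.toList).map transformAlt))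

-- ===== PRECONDITION & SPEC =====
def Spec_scoobydoo (string : String) (out : String) : Prop := out = scoobydoo_alt string
instance (string : String) (out : String) : Decidable (Spec_scoobydoo string out) := by unfold Spec_scoobydoo; infer_instance

-- ===== CLAIM (what is proved, stated in full; the proofs are below) =====
def Claim_equal_scoobydoo : Prop := ∀ (string : String), Dom_scoobydoo string → Spec_scoobydoo string (scoobydoo string)

-- ===== LEMMAS AND PROOFS =====

/-- No character of `w` is whitespace. -/
def noWS (w : List Char) : Prop := ∀ c ∈ w, PySem.Chars.isspace c = false

theorem foldl_skip_true (w acc : List Char) :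
    w.foldl scoobyStep (acc, true) = (acc ++ w, true) := by
  induction w generalizing acc with
  | nil => simp
  | cons c w ih => simp [List.foldl_cons, scoobyStep, ih]

theorem transformAlt_nil : transformAlt [] = [] := by
  simp [transformAlt]

theorem transformAlt_cons_vowel (c : Char) (w : List Char)
    (hv : PySem.Chars.lowerChar c ∈ pvVowels) :
    transformAlt (c :: w) = c :: w := by
  simp [transformAlt, List.findIdx?_cons, hv]

theorem transformAlt_cons_not_vowel (c : Char) (w : List Char)
    (hv : PySem.Chars.lowerChar c ∉ pvVowels) :
    transformAlt (c :: w) =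
      (if pvConsonants.contains (PySem.Chars.lowerChar c) then 'r' else c) :: transformAlt w := by
  cases h : w.findIdx? (fun c => decide (PySem.Chars.lowerChar c ∈ pvVowels)) with
  | none => simp [transformAlt, List.findIdx?_cons, hv, h]
  | some k => simp [transformAlt, List.findIdx?_cons, hv, h]

theorem foldl_scan_eq (w : List Char) (acc : List Char) :
    w.foldl scoobyStep (acc, false) =
      (acc ++ transformAlt w,
       w.any (fun c => pvVowels.contains (PySem.Chars.lowerChar c))) := by
  induction w generalizing acc with
  | nil => simp [transformAlt_nil]
  | cons c w ih =>
    by_cases hv : PySem.Chars.lowerChar c ∈ pvVowels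
    · simp [List.foldl_cons, scoobyStep, hv, foldl_skip_true, transformAlt_cons_vowel c w hv]
    · rw [List.foldl_cons]
      rw [transformAlt_cons_not_vowel c w hv]
      by_cases hc : PySem.Chars.lowerChar c ∈ pvConsonants
      · simp [scoobyStep, hv, hc, ih]
      · simp [scoobyStep, hv, hc, ih]

theorem foldl_words_eq (ws : List (List Char)) (init : List Char) :
    ws.foldl (fun acc word => (word.foldl scoobyStep (acc, false)).1 ++ [' ']) init =
      init ++ (ws.map (fun w => transformAlt w ++ [' '])).flatten := by
  induction ws generalizing init with
  | nil => simp
  | cons w ws ih => simp [List.foldl_cons, foldl_scan_eq]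

theorem rstrip_append_of_ne_nil (a b : List Char)
    (hb : PySem.Chars.rstrip b ≠ []) :
    PySem.Chars.rstrip (a ++ b) = a ++ PySem.Chars.rstrip b := by
  simp only [PySem.Chars.rstrip] at *
  rw [List.reverse_append, List.dropWhile_append]
  have : ¬ (b.reverse.dropWhile PySem.Chars.isspace).isEmpty = true := by
    intro h
    exact hb (by simp [List.isEmpty_iff.mp h])
  simp [this]

theorem rstrip_word_space (w : List Char) (hw : noWS w) :
    PySem.Chars.rstrip (w ++ [' ']) = w := by
  simp only [PySem.Chars.rstrip, List.reverse_append]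
  have h1 : PySem.Chars.isspace ' ' = true := by decide
  have h2 : w.reverse.dropWhile PySem.Chars.isspace = w.reverse := by
    cases hrev : w.reverse with
    | nil => simp
    | cons c t =>
      have hc : c ∈ w := by
        have : c ∈ w.reverse := by rw [hrev]; exact List.mem_cons_self
        simpa using this
      simp [hw c hc]
  simp [h1, h2]

theorem rstrip_flatten_eq_join (ws : List (List Char))
    (h : ∀ w ∈ ws, w ≠ [] ∧ noWS w) :
    PySem.Chars.rstrip ((ws.map (fun w => w ++ [' '])).flatten) =
      PySem.Chars.join [' '] ws := by
  induction ws with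
  | nil => simp [PySem.Chars.rstrip, PySem.Chars.join, List.intercalate]
  | cons w ws ih =>
    obtain ⟨hw, hwn⟩ := h w List.mem_cons_self
    have hrest : ∀ w ∈ ws, w ≠ [] ∧ noWS w := fun v hv => h v (List.mem_cons_of_mem _ hv)
    cases ws with
    | nil =>
      simp only [List.map_cons, List.map_nil, List.flatten_cons, List.flatten_nil,
        List.append_nil]
      rw [rstrip_word_space w hwn]
      simp [PySem.Chars.join, List.intercalate]
    | cons w2 ws' =>
      have hjoin_ne : PySem.Chars.rstrip (((w2 :: ws').map (fun w => w ++ [' '])).flatten) ≠ [] := by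
        rw [ih hrest]
        obtain ⟨hw2, _⟩ := hrest w2 List.mem_cons_self
        cases ws' with
        | nil =>
          simpa [PySem.Chars.join, List.intercalate] using hw2
        | cons w3 ws'' =>
          rw [PySem.Chars.join_cons_cons]
          intro hcontra
          exact hw2 (by simpa using (List.append_eq_nil_iff.mp
            (List.append_eq_nil_iff.mp hcontra).1).1)
      rw [List.map_cons, List.flatten_cons,
        rstrip_append_of_ne_nil (w ++ [' ']) _ hjoin_ne,
        ih hrest, PySem.Chars.join_cons_cons]

theorem split₀_go_inv (s : List Char) (cur : List Char) (acc : List (List Char))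
    (hacc : ∀ w ∈ acc, w ≠ [] ∧ noWS w) (hcur : noWS cur) :
    ∀ w ∈ PySem.Chars.split₀.go s cur acc, w ≠ [] ∧ noWS w := by
  induction s generalizing cur acc with
  | nil =>
    intro w hw
    by_cases hc : cur.isEmpty = true
    · rw [PySem.Chars.split₀.go, if_pos hc] at hw
      exact hacc w (by simpa using hw)
    · rw [PySem.Chars.split₀.go, if_neg hc] at hw
      rcases (by simpa using hw : w ∈ acc ∨ w = cur.reverse) with h | h
      · exact hacc w h
      · subst h
        refine ⟨by simpa [List.isEmpty_iff] using hc, fun c hcmem => hcur c (by simpa using hcmem)⟩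
  | cons c rest ih =>
    intro w hw
    by_cases hs : PySem.Chars.isspace c = true
    · by_cases hc : cur.isEmpty = true
      · rw [PySem.Chars.split₀.go, if_pos hs, if_pos hc] at hw
        exact ih [] acc hacc (by intro x hx; cases hx) w hw
      · rw [PySem.Chars.split₀.go, if_pos hs, if_neg hc] at hw
        refine ih [] (cur.reverse :: acc) ?_ (by intro x hx; cases hx) w hw
        intro v hv
        rcases List.mem_cons.mp hv with h | h
        · subst h
          exact ⟨by simpa [List.isEmpty_iff] using hc, fun d hd => hcur d (by simpa using hd)⟩
        · exact hacc v h
    · rw [PySem.Chars.split₀.go, if_neg hs] at hw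
      refine ih (c :: cur) acc hacc ?_ w hw
      intro d hd
      rcases List.mem_cons.mp hd with h | h
      · subst h; simpa using hs
      · exact hcur d h

theorem split₀_words (s : List Char) :
    ∀ w ∈ PySem.Chars.split₀ s, w ≠ [] ∧ noWS w := by
  exact split₀_go_inv s [] [] (by intro w hw; cases hw) (by intro c hc; cases hc)

theorem transformAlt_ne_nil (w : List Char) (hw : w ≠ []) : transformAlt w ≠ [] := by
  intro h
  have hlen : (transformAlt w).length = w.length := by
    simp [transformAlt]
    omega
  rw [h] at hlen
  exact hw (List.eq_nil_of_length_eq_zero hlen.symm)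

theorem transformAlt_noWS (w : List Char) (hw : noWS w) : noWS (transformAlt w) := by
  intro c hc
  simp only [transformAlt, List.mem_append, List.mem_map] at hc
  rcases hc with ⟨d, hd, hdc⟩ | h
  · subst hdc
    by_cases hcon : PySem.Chars.lowerChar d ∈ pvConsonants
    · simp [hcon]; decide
    · simp [hcon]
      exact hw d (List.mem_of_mem_take hd)
  · exact hw c (List.mem_of_mem_drop h)

-- ===== VERDICT (by name: the statement is the Claim_ definition above) =====
theorem scoobydoo_spec : Claim_equal_scoobydoo := by
  intro s _
  unfold Spec_scoobydoo scoobydoo scoobydoo_alt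
  simp only [foldl_words_eq]
  rw [show (PySem.Chars.split₀ s.toList).map (fun w => transformAlt w ++ [' '])
        = ((PySem.Chars.split₀ s.toList).map transformAlt).map (fun w => w ++ [' '])
      from by simp [List.map_map]]
  rw [List.nil_append, rstrip_flatten_eq_join]
  intro w hw
  obtain ⟨v, hv, hvw⟩ := List.mem_map.mp hw
  obtain ⟨hne, hn⟩ := split₀_words s.toList v hv
  exact hvw ▸ ⟨transformAlt_ne_nil v hne, transformAlt_noWS v hn⟩
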